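-- pv_equiv track=rewrite | github.com/elianeroosli/mimic-fairness-generalizability-casestudy | models/mimic/preprocessing.py | process_conf_list
-- ===== SOURCE A (Python) =====
-- def process_conf_list(conf_list, mask_demographics):
--     exclude_idx = []
--     for pos,ch in enumerate(conf_list):
--         if ch in mask_demographics:
--             exclude_idx.append(pos)
--     for i in sorted(exclude_idx, reverse=True):
--         del conf_list[i]
--     return conf_list
-- ===== SOURCE B (Python) =====
-- def process_conf_list(conf_list, mask_demographics):
--     write = 0
--     for ch in conf_list:
--         if ch not in mask_demographics:
--             conf_list[write] = ch
--             write += 1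
--     del conf_list[write:]
--     return conf_list
-- ===== Notes on version B (the rewrite author's own statement) =====
-- stated objective: alternative
-- what changed: A collects the positions of masked elements and then deletes them back-to-front with repeated del; B does one forward compaction with a write pointer and truncates the tail once, still in place on the same list object.
import Mathlib
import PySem

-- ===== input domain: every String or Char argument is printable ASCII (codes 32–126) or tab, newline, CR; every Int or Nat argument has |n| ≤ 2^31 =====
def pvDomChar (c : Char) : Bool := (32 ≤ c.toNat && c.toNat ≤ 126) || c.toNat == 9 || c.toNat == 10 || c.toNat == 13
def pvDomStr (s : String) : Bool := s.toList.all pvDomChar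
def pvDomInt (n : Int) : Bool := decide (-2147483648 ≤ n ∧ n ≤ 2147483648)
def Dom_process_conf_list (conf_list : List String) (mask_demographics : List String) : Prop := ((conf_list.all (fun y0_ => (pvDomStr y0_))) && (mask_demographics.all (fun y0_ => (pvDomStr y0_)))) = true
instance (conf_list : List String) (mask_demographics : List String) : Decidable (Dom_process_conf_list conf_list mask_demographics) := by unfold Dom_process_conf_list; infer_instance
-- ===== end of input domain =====

-- B replaces A's collect-masked-indices-then-delete-back-to-front pass by a single forward
-- write-pointer compaction with one tail truncation (alternative decomposition, same in-place
-- mutate-and-return contract in Python; the theorems here are about the return value).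

-- ===== PORT A =====
-- del conf_list[i]; the index always comes from enumerate over the same list after deleting only
-- larger indices, so pop? never returns none and the getD default is never used.
def process_conf_list (conf_list : List String) (mask_demographics : List String) : List String :=
  let exclude_idx : List Int :=
    (PySem.List.enumerate conf_list).foldl
      (fun acc pc => if pc.2 ∈ mask_demographics then acc ++ [pc.1] else acc) []
  (PySem.List.sorted exclude_idx (fun x => x) true).foldl
    (fun l i => ((PySem.List.pop? l i).map Prod.snd).getD l) conf_list

-- ===== PORT B =====
-- state = (buffer, write); conf_list[write] = ch is pySetD, del conf_list[write:] is List.take.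
def process_conf_list_alt (conf_list : List String) (mask_demographics : List String) : List String :=
  let st : List String × Nat :=
    conf_list.foldl
      (fun st ch =>
        if ch ∈ mask_demographics then st
        else (PySem.List.pySetD st.1 (st.2 : Int) ch, st.2 + 1))
      (conf_list, 0)
  st.1.take st.2

-- ===== PRECONDITION & SPEC =====
def Spec_process_conf_list (conf_list : List String) (mask_demographics : List String) (out : List String) : Prop := out = process_conf_list_alt conf_list mask_demographics
instance (conf_list : List String) (mask_demographics : List String) (out : List String) : Decidable (Spec_process_conf_list conf_list mask_demographics out) := by unfold Spec_process_conf_list; infer_instance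

-- ===== CLAIM (what is proved, stated in full; the proofs are below) =====
def Claim_equal_process_conf_list : Prop := ∀ (conf_list : List String) (mask_demographics : List String), Dom_process_conf_list conf_list mask_demographics → Spec_process_conf_list conf_list mask_demographics (process_conf_list conf_list mask_demographics)

-- ===== LEMMAS AND PROOFS =====

-- masked-index list of A, and the shared filtered result
def pvIdxs (mask : List String) (l : List String) : List Int :=
  ((PySem.List.enumerate l).filter (fun pc => decide (pc.2 ∈ mask))).map (·.1)

def pvKeep (mask : List String) (l : List String) : List String :=
  l.filter (fun s => decide (s ∉ mask))

def pvDel (l : List String) (i : Int) : List String :=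
  ((PySem.List.pop? l i).map Prod.snd).getD l

lemma pvDel_valid (l : List String) (i : Int) (h0 : 0 ≤ i) (h1 : i.toNat < l.length) :
    pvDel l i = l.eraseIdx i.toNat := by
  unfold pvDel
  have h := PySem.List.pop?_natCast l i.toNat h1
  rw [show ((i.toNat : Nat) : Int) = i by omega] at h
  rw [h]
  rfl

lemma pvIdxs_bounds (mask l : List String) : ∀ i ∈ pvIdxs mask l, 0 ≤ i ∧ i.toNat < l.length := by
  intro i hi
  unfold pvIdxs at hi
  simp only [List.mem_map, List.mem_filter] at hi
  obtain ⟨pc, ⟨hmem, -⟩, rfl⟩ := hi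
  rw [PySem.List.mem_enumerate_iff] at hmem
  obtain ⟨k, hk, rfl⟩ := hmem
  simp
  omega

lemma pvIdxs_pairwise (mask l : List String) : (pvIdxs mask l).Pairwise (· < ·) := by
  unfold pvIdxs
  exact ((PySem.List.pairwise_lt_enumerate l 0).filter _).map _ (fun a b h => h)

lemma pvIdxs_append (mask l : List String) (x : String) :
    pvIdxs mask (l ++ [x]) = pvIdxs mask l ++ (if x ∈ mask then [(l.length : Int)] else []) := by
  unfold pvIdxs
  rw [show PySem.List.enumerate (l ++ [x]) = PySem.List.enumerate l ++ [((l.length : Int), x)] by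
    simp [PySem.List.enumerate_append, PySem.List.enumerate_cons, PySem.List.enumerate_nil]]
  rw [List.filter_append, List.map_append]
  by_cases hx : x ∈ mask <;> simp [hx]

-- A's exclude_idx fold is pvIdxs, and sorting it in reverse is just reversing it
lemma pvA_sorted (mask l : List String) :
    PySem.List.sorted
      ((PySem.List.enumerate l).foldl
        (fun acc pc => if pc.2 ∈ mask then acc ++ [pc.1] else acc) [])
      (fun x => x) true = (pvIdxs mask l).reverse := by
  rw [show (fun (acc : List Int) (pc : Int × String) => if pc.2 ∈ mask then acc ++ [pc.1] else acc)
        = (fun acc pc => if (fun pc : Int × String => decide (pc.2 ∈ mask)) pc = true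
            then acc ++ [pc.1] else acc) by
      funext acc pc; simp]
  rw [PySem.List.foldl_append_if (fun pc : Int × String => decide (pc.2 ∈ mask)) (·.1)]
  refine PySem.List.sorted_rev_eq_of_perm_of_pairwise_gt _ _ (fun x : Int => x) ?_ ?_
  · exact List.reverse_perm (pvIdxs mask l)
  · exact (List.pairwise_reverse).mpr (by simpa using pvIdxs_pairwise mask l)

-- deleting at indices all below m.length commutes with a trailing [x]
lemma pvFold_del_append (x : String) : ∀ (ds : List Int) (m : List String),
    ds.Pairwise (· > ·) → (∀ i ∈ ds, 0 ≤ i ∧ i.toNat < m.length) →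
    ds.foldl pvDel (m ++ [x]) = ds.foldl pvDel m ++ [x] := by
  intro ds
  induction ds with
  | nil => intro m _ _; rfl
  | cons d ds ih =>
    intro m hpw hbd
    obtain ⟨h0, h1⟩ := hbd d (List.mem_cons_self ..)
    have hA : pvDel (m ++ [x]) d = m.eraseIdx d.toNat ++ [x] := by
      rw [pvDel_valid _ _ h0 (by simp; omega), List.eraseIdx_append_of_lt_length h1]
    have hB : pvDel m d = m.eraseIdx d.toNat := pvDel_valid _ _ h0 h1
    simp only [List.foldl_cons, hA, hB]
    refine ih _ (List.Pairwise.of_cons hpw) ?_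
    intro i hi
    have hlt : d > i := (List.pairwise_cons.mp hpw).1 i hi
    have := (hbd i (List.mem_cons_of_mem _ hi))
    refine ⟨this.1, ?_⟩
    rw [List.length_eraseIdx_of_lt h1]
    omega

lemma pvA_main (mask : List String) (l : List String) :
    (pvIdxs mask l).reverse.foldl pvDel l = pvKeep mask l := by
  induction l using List.reverseRecOn with
  | nil => rfl
  | append_singleton l x ih =>
    rw [pvIdxs_append, List.reverse_append]
    by_cases hx : x ∈ mask
    · simp only [hx, if_pos, List.reverse_cons, List.reverse_nil, List.nil_append,
        List.singleton_append, List.foldl_cons]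
      have hdel : pvDel (l ++ [x]) (l.length : Int) = l := by
        rw [pvDel_valid _ _ (by omega) (by simp)]
        rw [show ((l.length : Int)).toNat = l.length by omega,
          List.eraseIdx_append_of_length_le (by simp)]
        simp
      rw [hdel, ih]
      unfold pvKeep
      simp [hx]
    · simp only [hx, if_neg, not_false_iff, List.reverse_nil, List.nil_append]
      rw [pvFold_del_append x _ l
        ((List.pairwise_reverse).mpr (by simpa using pvIdxs_pairwise mask l))
        (fun i hi => by
          have := pvIdxs_bounds mask l i (by simpa using hi)
          exact ⟨this.1, this.2⟩), ih]
      unfold pvKeep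
      simp [hx]

-- B's compaction invariant
lemma pvB_invariant (mask : List String) : ∀ (xs K rest : List String),
    (pvKeep mask xs).length ≤ rest.length →
    xs.foldl
      (fun (st : List String × Nat) ch =>
        if ch ∈ mask then st
        else (PySem.List.pySetD st.1 (st.2 : Int) ch, st.2 + 1))
      (K ++ rest, K.length)
    = (K ++ pvKeep mask xs ++ rest.drop (pvKeep mask xs).length,
       K.length + (pvKeep mask xs).length) := by
  intro xs
  induction xs with
  | nil => intro K rest _; simp [pvKeep]
  | cons x xs ih =>
    intro K rest hlen
    by_cases hx : x ∈ mask
    · have hkeep : pvKeep mask (x :: xs) = pvKeep mask xs := by simp [pvKeep, hx]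
      simp only [List.foldl_cons, hx, if_pos]
      rw [ih K rest (by rw [← hkeep]; exact hlen), hkeep]
    · have hkeep : pvKeep mask (x :: xs) = x :: pvKeep mask xs := by simp [pvKeep, hx]
      obtain ⟨r0, rest', rfl⟩ : ∃ r0 rest', rest = r0 :: rest' := by
        cases rest with
        | nil => rw [hkeep] at hlen; simp at hlen
        | cons a b => exact ⟨a, b, rfl⟩
      simp only [List.foldl_cons, hx, if_neg, not_false_iff]
      rw [show PySem.List.pySetD (K ++ r0 :: rest') ((K.length : Nat) : Int) x
            = (K ++ [x]) ++ rest' by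
        rw [PySem.List.pySetD_natCast]
        simp]
      rw [show K.length + 1 = (K ++ [x]).length by simp]
      rw [ih (K ++ [x]) rest' (by rw [hkeep] at hlen; simpa using hlen), hkeep]
      simp [Nat.add_comm, Nat.add_left_comm]

lemma pvB_main (mask l : List String) : process_conf_list_alt l mask = pvKeep mask l := by
  unfold process_conf_list_alt
  have h := pvB_invariant mask l [] l (by simpa using (List.length_filter_le _ l))
  simp only [List.nil_append, List.length_nil] at h
  rw [h]
  simp

-- ===== VERDICT (by name: the statement is the Claim_ definition above) =====
theorem process_conf_list_spec : Claim_equal_process_conf_list := by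
  intro conf_list mask _
  unfold Spec_process_conf_list
  show (PySem.List.sorted
      ((PySem.List.enumerate conf_list).foldl
        (fun acc pc => if pc.2 ∈ mask then acc ++ [pc.1] else acc) [])
      (fun x => x) true).foldl pvDel conf_list = process_conf_list_alt conf_list mask
  rw [pvA_sorted mask conf_list, pvA_main, pvB_main]
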